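-- pv_equiv track=rewrite | github.com/ryanfrigo/consensusai | app/services/json_parser.py | _fix_unterminated_strings_robust
-- ===== SOURCE A (Python) =====
-- def _fix_unterminated_strings_robust(json_text: str) -> str:
--     """More robust fix for unterminated strings by finding and closing them properly."""
--     if not json_text:
--         return json_text
--
--     lines = json_text.splitlines()
--     repaired_lines = []
--     i = 0
--
--     while i < len(lines):
--         line = lines[i]
--         stripped = line.strip()
--
--         # Check if this line starts a string value that's not properly closed
--         if (('"justification":' in line or '"sell_trigger":' in line) and
--                 not stripped.endswith('",')):
--             # This is an unterminated string - collect all following lines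
--             string_lines = [line]
--             i += 1
--
--             # Collect all lines until we find a proper termination
--             while i < len(lines):
--                 next_line = lines[i]
--                 next_stripped = next_line.strip()
--
--                 # If we find a closing quote or brace, we're done
--                 if (next_stripped.endswith('",') or
--                         next_stripped.endswith('"')):
--                     string_lines.append(next_line)
--                     break
--                 elif (next_stripped.endswith('}') or
--                       next_stripped.endswith('},')):
--                     # End of object - close the string and add the brace
--                     string_lines.append(next_line)
--                     break
--                 else:
--                     string_lines.append(next_line)
--                     i += 1
--
--             # Now reconstruct the properly terminated string
--             if string_lines:
--                 first_line = string_lines[0]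
--                 key_part = first_line.split(':', 1)[0] + ': "'
--
--                 # Extract all the content
--                 content_parts = []
--                 for sl in string_lines:
--                     if sl == string_lines[0]:
--                         # First line - get content after the colon
--                         content = sl.split(':', 1)[1].strip().lstrip('"')
--                     else:
--                         content = sl.strip()
--                     content_parts.append(content)
--
--                 # Join all content and clean it up
--                 full_content = ' '.join(content_parts)
--                 # Remove any trailing braces or commas
--                 full_content = full_content.rstrip('}, ')
--
--                 # Create the properly terminated line
--                 repaired_line = key_part + full_content + '",'
--                 repaired_lines.append(repaired_line)
--
--                 # If the last line was a closing brace, add it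
--                 last_line_stripped = string_lines[-1].strip()
--                 if (last_line_stripped.endswith('}') or
--                         last_line_stripped.endswith('},')):
--                     repaired_lines.append(string_lines[-1])
--         else:
--             repaired_lines.append(line)
--
--         i += 1
--
--     return '\n'.join(repaired_lines)
-- ===== SOURCE B (Python) =====
-- def _close_group(key, parts, last):
--     res = [key + ': "' + ' '.join(parts).rstrip('}, ') + '",']
--     if last.strip().endswith(('}', '},')):
--         res.append(last)
--     return res
--
--
-- def _fix_unterminated_strings_robust(json_text: str) -> str:
--     """One forward pass with an explicit state machine: no inner collection
--     loop, no index arithmetic, no second pass over a collected group."""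
--     out = []
--     pending = None  # None, or (key, content_parts, last_raw_line)
--     for line in json_text.splitlines():
--         if pending is None:
--             if (('"justification":' in line or '"sell_trigger":' in line)
--                     and not line.strip().endswith('",')):
--                 key, rest = line.split(':', 1)
--                 pending = (key, [rest.strip().lstrip('"')], line)
--             else:
--                 out.append(line)
--         else:
--             key, parts, _ = pending
--             t = line.strip()
--             if t.endswith(('",', '"', '}', '},')):
--                 out.extend(_close_group(key, parts + [t], line))
--                 pending = None
--             else:
--                 pending = (key, parts + [t], line)
--     if pending is not None:
--         out.extend(_close_group(*pending))
--     return '\n'.join(out)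
-- ===== Notes on version B (the rewrite author's own statement) =====
-- stated objective: alternative
-- what changed: B replaces A's nested while-loops-with-index (inner collection loop, then a second rebuild pass over the collected group lines) by a single forward streaming pass over the lines with an explicit state-machine accumulator (pending = None or (key, content_parts, last_line)), so no inner loop, no slicing and no second pass over a group ever happens; Pre_ excludes texts with duplicated unterminated marker lines, an unspecified corner where A's by-value and B's by-position first-line treatment are both defensible.
import Mathlib
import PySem

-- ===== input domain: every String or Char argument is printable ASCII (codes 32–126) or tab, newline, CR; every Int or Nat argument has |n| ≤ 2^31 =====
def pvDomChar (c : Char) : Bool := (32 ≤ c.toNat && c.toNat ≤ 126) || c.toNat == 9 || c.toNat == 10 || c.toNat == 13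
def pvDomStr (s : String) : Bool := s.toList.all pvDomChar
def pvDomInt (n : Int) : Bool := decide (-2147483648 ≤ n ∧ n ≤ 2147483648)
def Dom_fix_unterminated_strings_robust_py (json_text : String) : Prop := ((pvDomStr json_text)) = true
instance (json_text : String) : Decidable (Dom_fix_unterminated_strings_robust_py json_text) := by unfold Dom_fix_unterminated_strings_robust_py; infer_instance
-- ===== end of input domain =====

-- B replaces A's nested index-mutating while-loops (inner collection loop plus a second rebuild pass
-- over the collected group) by ONE forward streaming pass with an explicit state-machine accumulator
-- (objective: alternative, same asymptotic cost).

-- hand ports of str primitives PySem lacks (exact on the ASCII domain):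
-- Python s.lstrip(chars) / s.rstrip(chars) with an explicit chars argument, and str '+'.
def pvLstripChars (chars : List Char) : List Char → List Char
  | [] => []
  | c :: t => if c ∈ chars then pvLstripChars chars t else c :: t

def pvStrLstrip (s : String) (chars : List Char) : String :=
  String.ofList (pvLstripChars chars s.toList)

def pvStrRstrip (s : String) (chars : List Char) : String :=
  String.ofList (pvLstripChars chars s.toList.reverse).reverse

def pvCat (a b : String) : String := String.ofList (a.toList ++ b.toList)

-- ===== PORT A =====
-- inner 'while i < len(lines)' collection loop of A: returns (string_lines, remaining lines)
def pvA_collect : List String → List String → List String × List String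
  | [], acc => (acc.reverse, [])
  | nl :: tl, acc =>
    let ns := PySem.Str.strip nl
    if PySem.Str.endswith ns "\"," || PySem.Str.endswith ns "\"" then
      ((nl :: acc).reverse, tl)
    else if PySem.Str.endswith ns "}" || PySem.Str.endswith ns "}," then
      ((nl :: acc).reverse, tl)
    else
      pvA_collect tl (nl :: acc)

-- needed by pvA_loop's decreasing_by
theorem pvA_collect_rest_le : ∀ (tl acc : List String), (pvA_collect tl acc).2.length ≤ tl.length := by
  intro tl
  induction tl with
  | nil => intro acc; simp [pvA_collect]
  | cons nl tl ih =>
    intro acc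
    simp only [pvA_collect]
    split
    · simp
    · split
      · simp
      · exact le_trans (ih (nl :: acc)) (Nat.le_succ _)

-- A's second pass: reconstruction of the collected string_lines
def pvA_rebuild (string_lines : List String) : List String :=
  match string_lines with
  | [] => []
  | first :: _ =>
    let key_part := pvCat ((PySem.List.pyGet? ((PySem.Str.splitMax? first ":" 1).getD []) 0).getD "") ": \""
    let content_parts := string_lines.map (fun sl =>
      if sl == first then
        pvStrLstrip (PySem.Str.strip ((PySem.List.pyGet? ((PySem.Str.splitMax? sl ":" 1).getD []) 1).getD "")) ['"']
      else PySem.Str.strip sl)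
    let full_content := pvStrRstrip (PySem.Str.join " " content_parts) ['}', ',', ' ']
    let repaired := pvCat (pvCat key_part full_content) "\","
    let last_line := (PySem.List.pyGet? string_lines (-1)).getD ""
    let lls := PySem.Str.strip last_line
    if PySem.Str.endswith lls "}" || PySem.Str.endswith lls "}," then [repaired, last_line]
    else [repaired]

-- A's outer while loop
def pvA_loop : List String → List String
  | [] => []
  | line :: tl =>
    let stripped := PySem.Str.strip line
    if (PySem.Str.isIn "\"justification\":" line || PySem.Str.isIn "\"sell_trigger\":" line)
        && !(PySem.Str.endswith stripped "\",") then
      let cr := pvA_collect tl [line]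
      pvA_rebuild cr.1 ++ pvA_loop cr.2
    else
      line :: pvA_loop tl
termination_by ls => ls.length
decreasing_by
  · have := pvA_collect_rest_le tl [line]
    simp only [List.length_cons]
    omega
  · simp

def fix_unterminated_strings_robust_py (json_text : String) : String :=
  if json_text == "" then json_text
  else PySem.Str.join "\n" (pvA_loop (PySem.Str.splitlines json_text))

-- ===== PORT B =====
-- B's terminator test on an already-stripped line (Python: t.endswith(('",', '"', '}', '},')))
def pvB_isTerm (t : String) : Bool :=
  PySem.Str.endswith t "\"," || PySem.Str.endswith t "\""
    || PySem.Str.endswith t "}" || PySem.Str.endswith t "},"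

-- Python helper _close_group
def pvB_close (key : String) (parts : List String) (last : String) : List String :=
  let res1 := pvCat (pvCat (pvCat key ": \"")
    (pvStrRstrip (PySem.Str.join " " parts) ['}', ',', ' '])) "\","
  if PySem.Str.endswith (PySem.Str.strip last) "}"
      || PySem.Str.endswith (PySem.Str.strip last) "}," then [res1, last]
  else [res1]

-- the single forward pass: state = none (normal) or some (key, content_parts, last_raw_line)
def pvB_go : List String → Option (String × List String × String) → List String
  | [], none => []
  | [], some (k, ps, last) => pvB_close k ps last
  | line :: tl, none =>
    if (PySem.Str.isIn "\"justification\":" line || PySem.Str.isIn "\"sell_trigger\":" line)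
        && !(PySem.Str.endswith (PySem.Str.strip line) "\",") then
      let sp := (PySem.Str.splitMax? line ":" 1).getD []
      pvB_go tl (some ((PySem.List.pyGet? sp 0).getD "",
        [pvStrLstrip (PySem.Str.strip ((PySem.List.pyGet? sp 1).getD "")) ['"']], line))
    else line :: pvB_go tl none
  | line :: tl, some (k, ps, _) =>
    let t := PySem.Str.strip line
    if pvB_isTerm t then pvB_close k (ps ++ [t]) line ++ pvB_go tl none
    else pvB_go tl (some (k, ps ++ [t], line))

def fix_unterminated_strings_robust_py_alt (json_text : String) : String :=
  PySem.Str.join "\n" (pvB_go (PySem.Str.splitlines json_text) none)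

-- ===== PRECONDITION & SPEC =====
-- a line that opens a merge group in A
def pvBadLine (s : String) : Bool :=
  (PySem.Str.isIn "\"justification\":" s || PySem.Str.isIn "\"sell_trigger\":" s)
    && !(PySem.Str.endswith (PySem.Str.strip s) "\",")

-- Pre_ excludes texts containing two identical unterminated justification/sell_trigger lines: whether a
-- continuation line exactly equal to the opening line gets the opening line's colon-split extraction
-- (A compares lines by value) or is kept whole like any continuation (B treats lines by position) is an
-- unspecified duplicate-line corner on which both values are defensible; no caller would specify either.
def Pre_fix_unterminated_strings_robust_py (json_text : String) : Prop :=
  ((PySem.Str.splitlines json_text).filter pvBadLine).Nodup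
instance (json_text : String) : Decidable (Pre_fix_unterminated_strings_robust_py json_text) := by
  unfold Pre_fix_unterminated_strings_robust_py; infer_instance

def pvWitness_fix_unterminated_strings_robust_py : String := "\"justification\": hello\nworld\""

def Spec_fix_unterminated_strings_robust_py (json_text : String) (out : String) : Prop := out = fix_unterminated_strings_robust_py_alt json_text
instance (json_text : String) (out : String) : Decidable (Spec_fix_unterminated_strings_robust_py json_text out) := by unfold Spec_fix_unterminated_strings_robust_py; infer_instance

-- ===== CLAIM (what is proved, stated in full; the proofs are below) =====
def Claim_equal_fix_unterminated_strings_robust_py : Prop := ∀ (json_text : String), Dom_fix_unterminated_strings_robust_py json_text → Pre_fix_unterminated_strings_robust_py json_text → Spec_fix_unterminated_strings_robust_py json_text (fix_unterminated_strings_robust_py json_text)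

-- ===== LEMMAS AND PROOFS =====

-- the break condition of A's inner loop, as one predicate on the raw line
def pvTerm (s : String) : Bool := pvB_isTerm (PySem.Str.strip s)

-- A's collection loop computes the slice of lines up to and including the first terminator
set_option maxHeartbeats 1000000 in
theorem pvA_collect_eq : ∀ (tl acc : List String),
    pvA_collect tl acc
      = match List.findIdx? pvTerm tl with
        | some j => (acc.reverse ++ tl.take (j + 1), tl.drop (j + 1))
        | none => (acc.reverse ++ tl, []) := by
  intro tl
  induction tl with
  | nil =>
    intro acc
    simp only [pvA_collect, List.findIdx?_nil, List.append_nil]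
  | cons nl tl ih =>
    intro acc
    by_cases hterm : pvTerm nl = true
    · have h2 : (PySem.Str.endswith (PySem.Str.strip nl) "\"," || PySem.Str.endswith (PySem.Str.strip nl) "\"") = true
          ∨ (PySem.Str.endswith (PySem.Str.strip nl) "}" || PySem.Str.endswith (PySem.Str.strip nl) "},") = true := by
        unfold pvTerm pvB_isTerm at hterm
        rcases Bool.or_eq_true_iff.mp hterm with h' | h'
        · rcases Bool.or_eq_true_iff.mp h' with h'' | h''
          · rcases Bool.or_eq_true_iff.mp h'' with h3 | h3
            · exact Or.inl (Bool.or_eq_true_iff.mpr (Or.inl h3))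
            · exact Or.inl (Bool.or_eq_true_iff.mpr (Or.inr h3))
          · exact Or.inr (Bool.or_eq_true_iff.mpr (Or.inl h''))
        · exact Or.inr (Bool.or_eq_true_iff.mpr (Or.inr h'))
      have hL : pvA_collect (nl :: tl) acc = ((nl :: acc).reverse, tl) := by
        simp only [pvA_collect]
        rcases h2 with h | h
        · rw [if_pos h]
        · by_cases h1 : (PySem.Str.endswith (PySem.Str.strip nl) "\"," || PySem.Str.endswith (PySem.Str.strip nl) "\"") = true
          · rw [if_pos h1]
          · rw [if_neg h1, if_pos h]
      rw [hL, List.findIdx?_cons, if_pos hterm]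
      simp
    · have hfalse : ¬ ((PySem.Str.endswith (PySem.Str.strip nl) "\"," || PySem.Str.endswith (PySem.Str.strip nl) "\"") = true)
          ∧ ¬ ((PySem.Str.endswith (PySem.Str.strip nl) "}" || PySem.Str.endswith (PySem.Str.strip nl) "},") = true) := by
        unfold pvTerm pvB_isTerm at hterm
        constructor
        · intro h
          rcases Bool.or_eq_true_iff.mp h with h1 | h1
          · exact hterm (Bool.or_eq_true_iff.mpr (Or.inl (Bool.or_eq_true_iff.mpr (Or.inl (Bool.or_eq_true_iff.mpr (Or.inl h1))))))
          · exact hterm (Bool.or_eq_true_iff.mpr (Or.inl (Bool.or_eq_true_iff.mpr (Or.inl (Bool.or_eq_true_iff.mpr (Or.inr h1))))))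
        · intro h
          rcases Bool.or_eq_true_iff.mp h with h1 | h1
          · exact hterm (Bool.or_eq_true_iff.mpr (Or.inl (Bool.or_eq_true_iff.mpr (Or.inr h1))))
          · exact hterm (Bool.or_eq_true_iff.mpr (Or.inr h1))
      have hL : pvA_collect (nl :: tl) acc = pvA_collect tl (nl :: acc) := by
        simp only [pvA_collect]
        rw [if_neg hfalse.1, if_neg hfalse.2]
      rw [hL, ih (nl :: acc), List.findIdx?_cons, if_neg hterm]
      cases hfi : List.findIdx? pvTerm tl with
      | none => simp
      | some j => simp [List.take_succ_cons, List.drop_succ_cons]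

-- A's key extraction and first-line content, by name (same subterms as in both ports)
def pvKeyOf (line : String) : String :=
  (PySem.List.pyGet? ((PySem.Str.splitMax? line ":" 1).getD []) 0).getD ""
def pvFcOf (line : String) : String :=
  pvStrLstrip (PySem.Str.strip ((PySem.List.pyGet? ((PySem.Str.splitMax? line ":" 1).getD []) 1).getD "")) ['"']

-- A's rebuild of a group with no duplicate of its first line equals B's _close_group call
set_option maxHeartbeats 1000000 in
theorem pvA_rebuild_eq (line : String) (g : List String)
    (hne : ∀ sl ∈ g, sl ≠ line) :
    pvA_rebuild (line :: g) = pvB_close (pvKeyOf line) (pvFcOf line :: g.map PySem.Str.strip) (g.getLastD line) := by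
  have h2 : g.map (fun sl =>
      if sl == line then
        pvStrLstrip (PySem.Str.strip ((PySem.List.pyGet? ((PySem.Str.splitMax? sl ":" 1).getD []) 1).getD "")) ['"']
      else PySem.Str.strip sl) = g.map PySem.Str.strip :=
    List.map_congr_left (fun sl hsl => if_neg (fun hc => hne sl hsl (eq_of_beq hc)))
  have hlast : (PySem.List.pyGet? (line :: g) (-1)).getD "" = g.getLastD line := by
    rw [PySem.List.pyGet?_neg_one]
    simp [List.getLast?_cons]
  simp only [pvA_rebuild, pvB_close, pvKeyOf, pvFcOf, List.map_cons, h2,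
    if_pos (beq_self_eq_true line), hlast]

-- B's in-group state processing, characterised by the first terminator index
set_option maxHeartbeats 1000000 in
theorem pvB_go_some : ∀ (tl : List String) (k : String) (ps : List String) (last : String),
    pvB_go tl (some (k, ps, last))
      = match List.findIdx? pvTerm tl with
        | some j => pvB_close k (ps ++ (tl.take (j + 1)).map PySem.Str.strip)
            ((tl.take (j + 1)).getLastD last) ++ pvB_go (tl.drop (j + 1)) none
        | none => pvB_close k (ps ++ tl.map PySem.Str.strip) (tl.getLastD last) := by
  intro tl
  induction tl with
  | nil =>
    intro k ps last
    simp only [pvB_go, List.findIdx?_nil, List.map_nil, List.append_nil, List.getLastD_nil]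
  | cons l t ih =>
    intro k ps last
    by_cases hterm : pvTerm l = true
    · have hL : pvB_go (l :: t) (some (k, ps, last))
          = pvB_close k (ps ++ [PySem.Str.strip l]) l ++ pvB_go t none := by
        simp only [pvB_go]
        rw [if_pos (show pvB_isTerm (PySem.Str.strip l) = true from hterm)]
      rw [hL, List.findIdx?_cons, if_pos hterm]
      simp
    · have hL : pvB_go (l :: t) (some (k, ps, last))
          = pvB_go t (some (k, ps ++ [PySem.Str.strip l], l)) := by
        simp only [pvB_go]
        rw [if_neg (show ¬ pvB_isTerm (PySem.Str.strip l) = true from hterm)]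
      rw [hL, ih, List.findIdx?_cons, if_neg hterm]
      cases hfi : List.findIdx? pvTerm t with
      | none =>
        simp [List.append_assoc, List.getLast?_cons, List.getLastD_eq_getLast?]
      | some j =>
        simp [List.take_succ_cons, List.drop_succ_cons, List.append_assoc, List.map_take,
          List.getLast?_cons, List.getLastD_eq_getLast?]

-- main loop equivalence under the no-duplicate precondition (fuel = an upper bound on the length)
set_option maxHeartbeats 1000000 in
theorem pv_loop_eq : ∀ (n : Nat) (ls : List String), ls.length ≤ n →
    (ls.filter pvBadLine).Nodup → pvA_loop ls = pvB_go ls none := by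
  intro n
  induction n with
  | zero =>
    intro ls hl _
    have h : ls = [] := List.eq_nil_of_length_eq_zero (Nat.le_zero.mp hl)
    subst h
    simp only [pvA_loop, pvB_go]
  | succ n ih =>
    intro ls hl hnd
    cases ls with
    | nil => simp only [pvA_loop, pvB_go]
    | cons line tl =>
      by_cases hb : pvBadLine line = true
      · have hb' : ((PySem.Str.isIn "\"justification\":" line || PySem.Str.isIn "\"sell_trigger\":" line)
            && !(PySem.Str.endswith (PySem.Str.strip line) "\",")) = true := hb
        have hfil : List.filter pvBadLine (line :: tl) = line :: List.filter pvBadLine tl := by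
          rw [List.filter_cons, if_pos hb]
        rw [hfil] at hnd
        have hnotmem : line ∉ List.filter pvBadLine tl := (List.nodup_cons.mp hnd).1
        have hndtl : (List.filter pvBadLine tl).Nodup := (List.nodup_cons.mp hnd).2
        have hne : ∀ sl ∈ tl, sl ≠ line := by
          intro sl hsl he
          exact hnotmem (List.mem_filter.mpr ⟨he ▸ hsl, he ▸ hb⟩)
        have eA : pvA_loop (line :: tl)
            = pvA_rebuild (pvA_collect tl [line]).1 ++ pvA_loop (pvA_collect tl [line]).2 := by
          simp only [pvA_loop]
          rw [if_pos hb']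
        have eB : pvB_go (line :: tl) none
            = pvB_go tl (some (pvKeyOf line, [pvFcOf line], line)) := by
          simp only [pvB_go, pvKeyOf, pvFcOf]
          rw [if_pos hb']
        rw [eA, eB, pvA_collect_eq tl [line], pvB_go_some]
        cases hfi : List.findIdx? pvTerm tl with
        | some j =>
          dsimp only
          have h1 : pvA_rebuild (line :: tl.take (j + 1))
              = pvB_close (pvKeyOf line) (pvFcOf line :: (tl.take (j + 1)).map PySem.Str.strip)
                  ((tl.take (j + 1)).getLastD line) :=
            pvA_rebuild_eq line _ (fun sl hsl => hne sl (List.mem_of_mem_take hsl))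
          have h2 : pvA_loop (tl.drop (j + 1)) = pvB_go (tl.drop (j + 1)) none := by
            apply ih
            · simp only [List.length_cons] at hl
              have := List.length_drop (l := tl) (i := j + 1)
              omega
            · exact List.Nodup.sublist (List.Sublist.filter _ (List.drop_sublist _ _)) hndtl
          rw [show [line].reverse ++ tl.take (j + 1) = line :: tl.take (j + 1) by simp, h1, h2]
          simp
        | none =>
          dsimp only
          have h1 : pvA_rebuild (line :: tl)
              = pvB_close (pvKeyOf line) (pvFcOf line :: tl.map PySem.Str.strip) (tl.getLastD line) :=
            pvA_rebuild_eq line _ hne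
          have h0 : pvA_loop ([] : List String) = [] := by simp only [pvA_loop]
          rw [show [line].reverse ++ tl = line :: tl by simp, h0, List.append_nil, h1]
          simp
      · have hb' : ¬ (((PySem.Str.isIn "\"justification\":" line || PySem.Str.isIn "\"sell_trigger\":" line)
            && !(PySem.Str.endswith (PySem.Str.strip line) "\",")) = true) := hb
        have hbf : pvBadLine line = false := by
          cases hx : pvBadLine line with
          | true => exact absurd hx hb
          | false => rfl
        have hfil : List.filter pvBadLine (line :: tl) = List.filter pvBadLine tl := by
          rw [List.filter_cons, if_neg (by rw [hbf]; simp)]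
        rw [hfil] at hnd
        have hltl : tl.length ≤ n := by
          simp only [List.length_cons] at hl
          omega
        have eA : pvA_loop (line :: tl) = line :: pvA_loop tl := by
          simp only [pvA_loop]
          rw [if_neg hb']
        have eB : pvB_go (line :: tl) none = line :: pvB_go tl none := by
          simp only [pvB_go]
          rw [if_neg hb']
        rw [eA, eB, ih tl hltl hnd]

-- ===== VERDICT (by name: the statement is the Claim_ definition above) =====
theorem fix_unterminated_strings_robust_py_spec : Claim_equal_fix_unterminated_strings_robust_py := by
  intro t _ hpre
  unfold Spec_fix_unterminated_strings_robust_py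
  unfold fix_unterminated_strings_robust_py fix_unterminated_strings_robust_py_alt
  by_cases ht : t = ""
  · subst ht
    have h0 : PySem.Str.splitlines "" = [] := by decide
    rw [if_pos (by decide), h0]
    have h1 : pvB_go [] none = [] := by simp only [pvB_go]
    rw [h1]
    decide
  · have h : (t == "") = false := by
      cases hx : t == "" with
      | true => exact absurd (eq_of_beq hx) ht
      | false => rfl
    rw [if_neg (by rw [h]; simp)]
    exact congrArg _ (pv_loop_eq (PySem.Str.splitlines t).length _ le_rfl hpre)
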